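-- pv_equiv track=rewrite | github.com/TriQuach/CurrentClean_Cohort_New | source/Cluster/GroupEnitiesAppearance_2ndVersion.py | makeCombination
-- ===== SOURCE A (Python) =====
-- from itertools import combinations
--
-- def makeCombination(array):
--     res = []
--     for i in range(2, len(array) + 1):
--         comb = combinations(array, i)
--         for i in list(comb):
--             concat = '-'.join(i)
--             res.append(concat)
--
--     return res
-- ===== SOURCE B (Python) =====
-- def makeCombination(array):
--     res = []
--
--     def pick(rest, need, prefix):
--         if need == 0:
--             res.append('-'.join(prefix))
--         elif rest:
--             pick(rest[1:], need - 1, prefix + [rest[0]])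
--             pick(rest[1:], need, prefix)
--
--     for size in range(2, len(array) + 1):
--         pick(array, size, [])
--     return res
-- ===== Notes on version B (the rewrite author's own statement) =====
-- stated objective: alternative
-- what changed: Replaces itertools.combinations with a hand-written include/skip recursion over the list that carries the chosen prefix and emits '-'.join(prefix) when the target size is reached, iterating sizes 2..n in the same order.
import Mathlib
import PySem

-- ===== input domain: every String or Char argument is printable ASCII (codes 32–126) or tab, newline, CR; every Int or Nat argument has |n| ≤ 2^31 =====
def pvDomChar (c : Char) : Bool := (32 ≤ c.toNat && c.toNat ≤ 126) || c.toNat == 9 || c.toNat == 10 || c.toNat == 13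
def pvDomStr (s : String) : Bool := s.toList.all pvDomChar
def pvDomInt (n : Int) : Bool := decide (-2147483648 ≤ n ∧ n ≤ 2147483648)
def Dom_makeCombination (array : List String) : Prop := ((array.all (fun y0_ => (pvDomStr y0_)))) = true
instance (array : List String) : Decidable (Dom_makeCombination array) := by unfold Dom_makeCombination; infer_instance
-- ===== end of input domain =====

-- B replaces itertools.combinations with an include/skip recursion carrying the chosen prefix; same order, same cost (objective: alternative).

-- ===== PORT A =====
-- literal port of A: loop i over range(2, len+1), list(combinations(array, i)), append '-'.join(i)
def makeCombination (array : List String) : List String :=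
  (PySem.List.pyRange 2 ((array.length : Int) + 1) 1).foldl
    (fun res i =>
      (PySem.List.combinations array i.toNat).foldl
        (fun res c => res ++ [PySem.Str.join "-" c]) res)
    []

-- ===== PORT B =====
-- literal port of B's pick: include the head (need-1 left) first, then skip it; emit join at need = 0
def pickAlt : List String → Nat → List String → List String
  | _, 0, pre => [PySem.Str.join "-" pre]
  | [], _ + 1, _ => []
  | x :: xs, n + 1, pre => pickAlt xs n (pre ++ [x]) ++ pickAlt xs (n + 1) pre

def makeCombination_alt (array : List String) : List String :=
  (PySem.List.pyRange 2 ((array.length : Int) + 1) 1).foldl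
    (fun res size => res ++ pickAlt array size.toNat [])
    []

-- ===== PRECONDITION & SPEC =====
def Spec_makeCombination (array : List String) (out : List String) : Prop := out = makeCombination_alt array
instance (array : List String) (out : List String) : Decidable (Spec_makeCombination array out) := by unfold Spec_makeCombination; infer_instance

-- ===== CLAIM (what is proved, stated in full; the proofs are below) =====
def Claim_equal_makeCombination : Prop := ∀ (array : List String), Dom_makeCombination array → Spec_makeCombination array (makeCombination array)

-- ===== LEMMAS AND PROOFS =====

-- pick's recursion enumerates exactly CPython's combinations order, with the prefix prepended
theorem pickAlt_eq (xs : List String) : ∀ (n : Nat) (pre : List String),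
    pickAlt xs n pre = (PySem.List.combinations xs n).map (fun c => PySem.Str.join "-" (pre ++ c)) := by
  induction xs with
  | nil =>
      intro n pre
      cases n with
      | zero => simp [pickAlt, PySem.List.combinations_zero]
      | succ m => simp [pickAlt, PySem.List.combinations_nil_succ]
  | cons x xs ih =>
      intro n pre
      cases n with
      | zero => simp [pickAlt, PySem.List.combinations_zero]
      | succ m =>
          simp [pickAlt, PySem.List.combinations_cons_succ, ih, List.map_map, Function.comp]

-- ===== VERDICT (by name: the statement is the Claim_ definition above) =====
theorem foldl_inner_eq (array : List String) (l : List Int) : ∀ (acc : List String),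
    l.foldl (fun res i => (PySem.List.combinations array i.toNat).foldl
        (fun res c => res ++ [PySem.Str.join "-" c]) res) acc
      = l.foldl (fun res size => res ++ pickAlt array size.toNat []) acc := by
  induction l with
  | nil => intro acc; rfl
  | cons i l ih =>
      intro acc
      simp only [List.foldl_cons]
      rw [PySem.List.foldl_append_singleton_eq_map, pickAlt_eq, ih]
      simp

theorem makeCombination_spec : Claim_equal_makeCombination := by
  intro array _
  unfold Spec_makeCombination makeCombination makeCombination_alt
  exact foldl_inner_eq array _ []
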